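-- pv_equiv track=rewrite | github.com/AbhayShuklaIIT/Legal_NER | CLS/validate.py | get_list_from_labels_v1
-- ===== SOURCE A (Python) =====
-- def get_list_from_labels_v1(roles, label_to_int_dict):
--     y = []
--     keys = list(label_to_int_dict.keys())
--     for i in range(len(keys)):
--         if keys[i] in roles:
--             y.append(1)
--         else:
--             y.append(0)
--     return y
-- ===== SOURCE B (Python) =====
-- def get_list_from_labels_v1(roles, label_to_int_dict):
--     y = [0] * len(label_to_int_dict)
--     pos = {k: i for i, k in enumerate(label_to_int_dict.keys())}
--     for r in roles:
--         if r in pos: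
--             y[pos[r]] = 1
--     return y
-- ===== Notes on version B (the rewrite author's own statement) =====
-- stated objective: faster
-- what changed: Instead of probing each dict key against roles with a linear list-membership test, B pre-sizes a zero vector, builds a key->position hash map once over the dict keys, and scatters 1s in a single pass over roles.
import Mathlib
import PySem

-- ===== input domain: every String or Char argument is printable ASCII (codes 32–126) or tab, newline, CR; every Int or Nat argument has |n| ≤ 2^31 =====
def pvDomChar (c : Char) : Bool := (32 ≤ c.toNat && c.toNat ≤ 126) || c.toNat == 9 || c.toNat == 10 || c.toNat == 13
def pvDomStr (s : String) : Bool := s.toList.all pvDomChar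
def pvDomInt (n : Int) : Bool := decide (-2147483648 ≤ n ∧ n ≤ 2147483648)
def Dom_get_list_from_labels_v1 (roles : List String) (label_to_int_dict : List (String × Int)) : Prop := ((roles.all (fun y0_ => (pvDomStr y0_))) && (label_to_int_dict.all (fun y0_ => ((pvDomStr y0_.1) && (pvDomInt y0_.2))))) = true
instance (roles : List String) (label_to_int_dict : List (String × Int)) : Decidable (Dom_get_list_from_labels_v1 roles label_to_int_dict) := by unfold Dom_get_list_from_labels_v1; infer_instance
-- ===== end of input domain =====

-- B builds a zero vector and a key→position map once, then scatters 1s from the roles list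
-- (one pass over roles with a hash lookup) instead of probing every dict key against roles.

-- ===== PORT A =====
def get_list_from_labels_v1 (roles : List String) (label_to_int_dict : List (String × Int)) : List Int :=
  -- y = []; keys = list(label_to_int_dict.keys())
  let keys := (PySem.Dict.ofList label_to_int_dict).keys
  -- for i in range(len(keys)): if keys[i] in roles: y.append(1) else: y.append(0)
  (PySem.List.pyRange 0 (PySem.List.len keys) 1).foldl
    (fun y i => if roles.contains (PySem.List.pyGetD keys i "") then y ++ [1] else y ++ [0]) []

-- ===== PORT B =====
-- pos = {k: i for i, k in enumerate(label_to_int_dict.keys())}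
def pvPosMap (ks : List String) : PySem.Dict String Int :=
  (PySem.List.enumerate ks).foldl (fun p ik => p.insert ik.2 ik.1) PySem.Dict.empty

def get_list_from_labels_v1_alt (roles : List String) (label_to_int_dict : List (String × Int)) : List Int :=
  let ks := (PySem.Dict.ofList label_to_int_dict).keys
  -- y = [0] * len(label_to_int_dict)
  let y0 := List.replicate ks.length (0 : Int)
  -- for r in roles: if r in pos: y[pos[r]] = 1
  roles.foldl (fun y r =>
    match (pvPosMap ks).get? r with
    | some i => PySem.List.pySetD y i 1
    | none => y) y0

-- ===== PRECONDITION & SPEC =====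
def Spec_get_list_from_labels_v1 (roles : List String) (label_to_int_dict : List (String × Int)) (out : List Int) : Prop := out = get_list_from_labels_v1_alt roles label_to_int_dict
instance (roles : List String) (label_to_int_dict : List (String × Int)) (out : List Int) : Decidable (Spec_get_list_from_labels_v1 roles label_to_int_dict out) := by unfold Spec_get_list_from_labels_v1; infer_instance

-- ===== CLAIM (what is proved, stated in full; the proofs are below) =====
def Claim_equal_get_list_from_labels_v1 : Prop := ∀ (roles : List String) (label_to_int_dict : List (String × Int)), Dom_get_list_from_labels_v1 roles label_to_int_dict → Spec_get_list_from_labels_v1 roles label_to_int_dict (get_list_from_labels_v1 roles label_to_int_dict)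

-- ===== LEMMAS AND PROOFS =====

-- the position map's items are exactly (key, index) for each index
theorem pvPosMap_items (ks : List String) (hnd : ks.Nodup) :
    (pvPosMap ks).items = (PySem.List.enumerate ks).map (fun ik => (ik.2, ik.1)) := by
  unfold pvPosMap
  have := PySem.Dict.items_foldl_insert_fresh (PySem.List.enumerate ks)
    (fun ik => ik.2) (fun ik => ik.1) PySem.Dict.empty
    (by intro a _; simp [PySem.Dict.contains_empty])
    (by rw [show (List.map (fun ik : Int × String => ik.2) (PySem.List.enumerate ks)) =
            List.map (fun x : Int × String => x.2) (PySem.List.enumerate ks) from rfl,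
          PySem.List.map_snd_enumerate]; exact hnd)
  simpa [PySem.Dict.items] using this

theorem pvPosMap_keys (ks : List String) (hnd : ks.Nodup) : (pvPosMap ks).keys = ks := by
  have h := pvPosMap_items ks hnd
  show ((pvPosMap ks).items).map (·.1) = ks
  rw [h, List.map_map]
  exact PySem.List.map_snd_enumerate ks 0

theorem pvPosMap_get?_some (ks : List String) (hnd : ks.Nodup) (r : String) (i : Int) :
    (pvPosMap ks).get? r = some i ↔ ∃ j : Nat, j < ks.length ∧ i = (j : Int) ∧ ks[j]? = some r := by
  rw [PySem.Dict.get?_eq_some_iff_mem_items _ _ _ (by rw [pvPosMap_keys ks hnd]; exact hnd),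
      pvPosMap_items ks hnd]
  constructor
  · intro h
    rcases List.mem_map.mp h with ⟨p, hp, hpe⟩
    rcases (PySem.List.mem_enumerate_iff ks 0 p).mp hp with ⟨k, hk, rfl⟩
    refine ⟨k, hk, ?_, ?_⟩
    · have := congrArg Prod.snd hpe; simpa using this.symm
    · have := congrArg Prod.fst hpe
      simp at this
      rw [List.getElem?_eq_getElem hk, this]
  · rintro ⟨j, hj, rfl, hjr⟩
    refine List.mem_map.mpr ⟨((j : Int), r), ?_, rfl⟩
    rw [PySem.List.mem_enumerate_iff]
    exact ⟨j, hj, by simp [List.getElem?_eq_getElem hj] at hjr; simp [hjr]⟩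

theorem pvPosMap_get?_none (ks : List String) (hnd : ks.Nodup) (r : String) :
    (pvPosMap ks).get? r = none ↔ r ∉ ks := by
  rw [PySem.Dict.get?_eq_none_iff_not_mem_keys, pvPosMap_keys ks hnd]

-- scatter-loop invariant: position j of the result is 1 iff some role names ks[j]
theorem pvScatter_getElem? (ks : List String) (hnd : ks.Nodup) (roles : List String)
    (y : List Int) (hy : y.length = ks.length) (j : Nat) :
    (roles.foldl (fun y r =>
      match (pvPosMap ks).get? r with
      | some i => PySem.List.pySetD y i 1
      | none => y) y)[j]? =
    if (∃ r ∈ roles, ks[j]? = some r) then some 1 else y[j]? := by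
  induction roles generalizing y with
  | nil => simp
  | cons r rest ih =>
    have hstep : ∀ z : List Int, z.length = ks.length →
        ((match (pvPosMap ks).get? r with
          | some i => PySem.List.pySetD z i 1
          | none => z) : List Int).length = ks.length := by
      intro z hz
      cases h : (pvPosMap ks).get? r with
      | none => simpa using hz
      | some i => simp [PySem.List.length_pySetD, hz]
    rw [List.foldl_cons, ih _ (hstep y hy)]
    by_cases hrest : ∃ r' ∈ rest, ks[j]? = some r'
    · rw [if_pos hrest, if_pos (show ∃ r' ∈ r :: rest, ks[j]? = some r' by
        rcases hrest with ⟨r', hr', h⟩; exact ⟨r', List.mem_cons_of_mem _ hr', h⟩)]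
    · rw [if_neg hrest]
      cases h : (pvPosMap ks).get? r with
      | none =>
        dsimp only
        have hr : ks[j]? ≠ some r := by
          intro hc
          exact (pvPosMap_get?_none ks hnd r).mp h (List.mem_of_getElem? hc)
        rw [if_neg (show ¬ ∃ r' ∈ r :: rest, ks[j]? = some r' by
          rintro ⟨r', hr', hkj⟩
          rcases List.mem_cons.mp hr' with rfl | hmem
          · exact hr hkj
          · exact hrest ⟨r', hmem, hkj⟩)]
      | some i =>
        dsimp only
        rcases (pvPosMap_get?_some ks hnd r i).mp h with ⟨j0, hj0, rfl, hkj0⟩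
        rw [PySem.List.pySetD_natCast]
        by_cases hjj : j = j0
        · subst hjj
          rw [if_pos (show ∃ r' ∈ r :: rest, ks[j]? = some r' from ⟨r, List.mem_cons_self, hkj0⟩)]
          simp [hy ▸ hj0]
        · rw [List.getElem?_set_ne (fun hc => hjj hc.symm)]
          rw [if_neg (show ¬ ∃ r' ∈ r :: rest, ks[j]? = some r' by
            rintro ⟨r', hr', hkj⟩
            rcases List.mem_cons.mp hr' with rfl | hmem
            · -- ks[j]? = some r and ks[j0]? = some r with j ≠ j0 contradicts Nodup
              refine hjj (List.getElem?_inj ?_ hnd (by rw [hkj, hkj0]))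
              obtain ⟨hlt, -⟩ := List.getElem?_eq_some_iff.mp hkj
              exact hlt
            · exact hrest ⟨r', hmem, hkj⟩)]

-- A's loop is the membership map over the keys
theorem pvA_eq_map (roles : List String) (d : List (String × Int)) :
    get_list_from_labels_v1 roles d =
      ((PySem.Dict.ofList d).keys).map (fun k => if roles.contains k then (1 : Int) else 0) := by
  show (PySem.List.pyRange 0 (PySem.List.len ((PySem.Dict.ofList d).keys)) 1).foldl
    (fun y i => if roles.contains (PySem.List.pyGetD ((PySem.Dict.ofList d).keys) i "") then y ++ [1] else y ++ [0]) [] = _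
  have hcongr : (fun (y : List Int) (i : Int) =>
        if roles.contains (PySem.List.pyGetD ((PySem.Dict.ofList d).keys) i "") then y ++ [1] else y ++ [0])
      = (fun (y : List Int) (i : Int) =>
        y ++ [if roles.contains (PySem.List.pyGetD ((PySem.Dict.ofList d).keys) i "") then (1:Int) else 0]) := by
    funext y i; split <;> rfl
  rw [hcongr,
    PySem.List.foldl_pyRange_zero_pyGetD ((PySem.Dict.ofList d).keys) ""
      (fun (y : List Int) k => y ++ [if roles.contains k then (1:Int) else 0]) [],
    PySem.List.foldl_append_singleton_eq_map]
  simp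

-- ===== VERDICT (by name: the statement is the Claim_ definition above) =====
theorem get_list_from_labels_v1_spec : Claim_equal_get_list_from_labels_v1 := by
  intro roles d _
  show get_list_from_labels_v1 roles d = get_list_from_labels_v1_alt roles d
  rw [pvA_eq_map]
  show _ = List.foldl (fun y r =>
      match (pvPosMap ((PySem.Dict.ofList d).keys)).get? r with
      | some i => PySem.List.pySetD y i 1
      | none => y) (List.replicate ((PySem.Dict.ofList d).keys).length (0 : Int)) roles
  set ks := (PySem.Dict.ofList d).keys with hks
  have hnd : ks.Nodup := PySem.Dict.nodup_keys_ofList d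
  apply List.ext_getElem?
  intro j
  rw [pvScatter_getElem? ks hnd roles (List.replicate ks.length 0) (by simp) j]
  by_cases hjl : j < ks.length
  · rw [List.getElem?_map, List.getElem?_eq_getElem hjl, List.getElem?_replicate_of_lt hjl]
    by_cases hmem : ks[j] ∈ roles
    · simp [hmem]
    · have hno : ¬ ∃ r ∈ roles, ks[j]? = some r := by
        rintro ⟨r, hr, hkj⟩
        rw [List.getElem?_eq_getElem hjl] at hkj
        exact hmem (by injection hkj with h; rw [h]; exact hr)
      simp [hmem]
  · have h1 : ks[j]? = none := List.getElem?_eq_none (Nat.le_of_not_lt hjl)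
    rw [List.getElem?_map, h1]
    simp [List.getElem?_replicate]
    omega
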